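-- pv_equiv track=rewrite | github.com/pisterlabs/promptset | data/scraping-2.0/repos/dw31382~cogitatio/local.py | delete_children
-- ===== SOURCE A (Python) =====
-- def delete_children(adj, id):
--     # if root
--     if id == "0":
--         pass
--     else:
--         # if leaf
--         if adj[id][0] == []:
--             pass
--         else:
--             for child in adj[id][0]:
--                 adj = delete_children(adj, child)
--             adj[id][0] = []
--     return(adj)
-- ===== SOURCE B (Python) =====
-- def delete_children(adj, id):
--     # Iterative two-phase rewrite: a worklist discovers every node reachable from
--     # id (never expanding "0"), then a single batch pass clears each discovered
--     # node's children list.  Like A, mutates adj in place and returns it.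
--     if id == "0":
--         return adj
--     order = [id]
--     seen = {id}
--     i = 0
--     while i < len(order):
--         node = order[i]
--         i += 1
--         if node == "0":
--             continue
--         for child in adj[node][0]:
--             if child not in seen:
--                 seen.add(child)
--                 order.append(child)
--     for node in order:
--         if node != "0":
--             adj[node][0] = []
--     return adj
-- ===== Notes on version B (the rewrite author's own statement) =====
-- stated objective: alternative
-- what changed: Replaces A's post-order recursion (which clears each node's children list after recursing into it) by an iterative two-phase algorithm: an explicit worklist with a seen-set computes the set of nodes reachable from id, then one batch pass clears every discovered node.
import Mathlib
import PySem

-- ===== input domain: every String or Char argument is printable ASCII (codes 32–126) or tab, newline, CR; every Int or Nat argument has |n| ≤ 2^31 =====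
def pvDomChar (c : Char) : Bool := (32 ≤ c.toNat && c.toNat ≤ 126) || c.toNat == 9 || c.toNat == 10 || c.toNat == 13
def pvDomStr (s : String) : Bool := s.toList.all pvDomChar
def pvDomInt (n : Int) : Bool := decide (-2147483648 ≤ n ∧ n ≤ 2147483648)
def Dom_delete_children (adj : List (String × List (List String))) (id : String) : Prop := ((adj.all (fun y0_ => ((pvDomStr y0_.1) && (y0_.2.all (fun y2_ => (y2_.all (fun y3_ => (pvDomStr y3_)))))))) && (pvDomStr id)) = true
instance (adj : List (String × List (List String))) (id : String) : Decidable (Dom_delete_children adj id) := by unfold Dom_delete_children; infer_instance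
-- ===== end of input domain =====

-- B replaces A's post-order recursion by an iterative two-phase algorithm (worklist
-- reachability discovery, then one batch clearing pass); both Pythons mutate adj in
-- place and return it — the equivalence proved here is about the return value.

-- ===== PORT A =====
-- A's recursion can loop forever on a cyclic graph (Python: RecursionError); the fuel
-- adj.length + 2 is a totality guard only — Pre_ guarantees it is never exhausted.
def dcA (fuel : Nat) (d : PySem.Dict String (List (List String))) (id : String) :
    PySem.Dict String (List (List String)) :=
  match fuel with
  | 0 => d
  | f + 1 =>
    if id = "0" then d
    else
      match d.get? id with
      | none => d                       -- KeyError (excluded by Pre_)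
      | some v =>
        match PySem.List.pyGet? v 0 with
        | none => d                     -- IndexError (excluded by Pre_)
        | some c =>
          if c = [] then d              -- leaf: pass
          else
            let d' := c.foldl (fun a child => dcA f a child) d
            d'.insert id (PySem.List.pySetD (d'.getD id []) 0 [])   -- adj[id][0] = []

def delete_children (adj : List (String × List (List String))) (id : String) :
    List (String × List (List String)) :=
  (dcA (adj.length + 2) (PySem.Dict.mk adj) id).items

-- ===== PORT B =====
-- the discovery loop of Source B; fuel adj.length + 2 is a totality guard only
def bDiscover (fuel : Nat) (d : PySem.Dict String (List (List String)))
    (order : List String) (seen : PySem.Set String) (i : Nat) : List String :=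
  match fuel with
  | 0 => order
  | f + 1 =>
    if i < order.length then
      let node := order.getD i ""
      if node = "0" then bDiscover f d order seen (i + 1)
      else
        let st := (PySem.List.pyGetD (d.getD node []) 0 []).foldl
          (fun (p : List String × PySem.Set String) child =>
            if child ∈ p.2 then p else (p.1 ++ [child], PySem.Set.add p.2 child))
          (order, seen)
        bDiscover f d st.1 st.2 (i + 1)
    else order

def delete_children_alt (adj : List (String × List (List String))) (id : String) :
    List (String × List (List String)) :=
  if id = "0" then adj
  else
    let d := PySem.Dict.mk adj
    let order := bDiscover (adj.length + 2) d [id] (PySem.Set.ofList [id]) 0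
    (order.foldl (fun a node =>
        if node = "0" then a
        else a.insert node (PySem.List.pySetD (a.getD node []) 0 [])) d).items

-- ===== PRECONDITION & SPEC =====
-- children read from the adjacency dict ("0" has none and is never expanded)
def childsOf (d : PySem.Dict String (List (List String))) (k : String) : List String :=
  if k = "0" then []
  else
    match d.get? k with
    | some (c :: _) => c
    | _ => []

def stepF (d : PySem.Dict String (List (List String))) (S : Finset String) : Finset String :=
  S ∪ S.biUnion (fun k => (childsOf d k).toFinset)

def univF (d : PySem.Dict String (List (List String))) (S : Finset String) : Finset String :=
  S ∪ (d.items.map Prod.fst).toFinset ∪ (d.items.map (fun p => p.2.headD [])).flatten.toFinset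

-- reachability closure, computed by saturating stepF
def clF (d : PySem.Dict String (List (List String))) (S : Finset String) : Finset String :=
  (stepF d)^[(univF d S).card] S

-- Pre_ excludes exactly the inputs where A raises — a node reachable from id that is
-- missing from adj (KeyError) or has an empty value list (IndexError), or a reachable
-- cycle (RecursionError) — and association lists with duplicate keys, on which the
-- assoc-list/dict correspondence is ambiguous (a Python dict cannot carry them).
def Pre_delete_children (adj : List (String × List (List String))) (id : String) : Prop :=
  (adj.map Prod.fst).Nodup ∧
  ∀ k ∈ clF (PySem.Dict.mk adj) {id}, k ≠ "0" →
    ((PySem.Dict.mk adj).get? k).getD [] ≠ [] ∧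
    k ∉ clF (PySem.Dict.mk adj) (childsOf (PySem.Dict.mk adj) k).toFinset

instance (adj : List (String × List (List String))) (id : String) :
    Decidable (Pre_delete_children adj id) := by unfold Pre_delete_children; infer_instance

def pvWitness_delete_children : (List (String × List (List String))) × String :=
  ([("1", [["2", "0"]]), ("2", [[]])], "1")

def Spec_delete_children (adj : List (String × List (List String))) (id : String)
    (out : List (String × List (List String))) : Prop := out = delete_children_alt adj id

instance (adj : List (String × List (List String))) (id : String)
    (out : List (String × List (List String))) :
    Decidable (Spec_delete_children adj id out) := by unfold Spec_delete_children; infer_instance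

-- ===== CLAIM (what is proved, stated in full; the proofs are below) =====
def Claim_equal_delete_children : Prop :=
  ∀ (adj : List (String × List (List String))) (id : String),
    Dom_delete_children adj id → Pre_delete_children adj id →
    Spec_delete_children adj id (delete_children adj id)


-- ===== LEMMAS AND PROOFS =====

-- ---- closure machinery ----
lemma subset_stepF (d : PySem.Dict String (List (List String))) (S : Finset String) :
    S ⊆ stepF d S := Finset.subset_union_left

lemma mem_stepF_of_child {d : PySem.Dict String (List (List String))} {S : Finset String}
    {k c : String} (hk : k ∈ S) (hc : c ∈ childsOf d k) : c ∈ stepF d S := by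
  unfold stepF
  exact Finset.mem_union_right _ (Finset.mem_biUnion.2 ⟨k, hk, List.mem_toFinset.2 hc⟩)

lemma stepF_mono (d : PySem.Dict String (List (List String))) {S T : Finset String}
    (h : S ⊆ T) : stepF d S ⊆ stepF d T := by
  unfold stepF
  exact Finset.union_subset_union h (Finset.biUnion_subset_biUnion_of_subset_left _ h)

lemma stepF_subset_of_closed (d : PySem.Dict String (List (List String))) {T : Finset String}
    (hT : ∀ k ∈ T, (childsOf d k).toFinset ⊆ T) : stepF d T ⊆ T := by
  unfold stepF
  refine Finset.union_subset subset_rfl (Finset.biUnion_subset.2 hT)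

lemma iterate_subset_of_closed (d : PySem.Dict String (List (List String)))
    {T : Finset String} (hT : stepF d T ⊆ T) :
    ∀ (m : Nat) (S : Finset String), S ⊆ T → (stepF d)^[m] S ⊆ T := by
  intro m
  induction m with
  | zero => intro S h; simpa using h
  | succ m ih =>
    intro S h
    rw [Function.iterate_succ_apply]
    exact ih _ ((stepF_mono d h).trans hT)

lemma subset_iterate (d : PySem.Dict String (List (List String))) (m : Nat) (S : Finset String) :
    S ⊆ (stepF d)^[m] S := by
  induction m with
  | zero => simp
  | succ m ih =>
    rw [Function.iterate_succ_apply']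
    exact ih.trans (subset_stepF d _)

lemma stepF_subset_univ (d : PySem.Dict String (List (List String))) {S0 T : Finset String}
    (hT : T ⊆ univF d S0) : stepF d T ⊆ univF d S0 := by
  unfold stepF
  refine Finset.union_subset hT (Finset.biUnion_subset.2 ?_)
  intro k _hk c hc
  rw [List.mem_toFinset] at hc
  unfold childsOf at hc
  split_ifs at hc with h0
  · simp at hc
  · rcases hget : d.get? k with _ | v
    · rw [hget] at hc; simp at hc
    · rw [hget] at hc
      rcases v with _ | ⟨cs, rest⟩
      · simp at hc
      · -- c ∈ cs, and (k, cs :: rest) ∈ d.items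
        have hmem : (k, cs :: rest) ∈ d.items := PySem.Dict.mem_items_of_get?_eq_some d hget
        unfold univF
        refine Finset.mem_union_right _ ?_
        rw [List.mem_toFinset, List.mem_flatten]
        exact ⟨cs, List.mem_map.2 ⟨(k, cs :: rest), hmem, rfl⟩, hc⟩

lemma saturate (d : PySem.Dict String (List (List String))) (S0 : Finset String) :
    ∀ (m : Nat) (S : Finset String), S ⊆ univF d S0 → (univF d S0).card ≤ S.card + m →
      stepF d ((stepF d)^[m] S) = (stepF d)^[m] S := by
  intro m
  induction m with
  | zero =>
    intro S hsub hcard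
    have : S = univF d S0 := Finset.eq_of_subset_of_card_le hsub (by simpa using hcard)
    subst this
    simpa using le_antisymm (stepF_subset_univ d subset_rfl) (subset_stepF d _)
  | succ m ih =>
    intro S hsub hcard
    by_cases hfix : stepF d S = S
    · rw [Function.iterate_fixed hfix, hfix]
    · rw [Function.iterate_succ_apply]
      refine ih _ (stepF_subset_univ d hsub) ?_
      have hlt : S.card < (stepF d S).card :=
        Finset.card_lt_card ((subset_stepF d S).ssubset_of_ne (Ne.symm hfix))
      omega

lemma clF_fixed (d : PySem.Dict String (List (List String))) (S : Finset String) :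
    stepF d (clF d S) = clF d S := by
  unfold clF
  exact saturate d S _ S (by unfold univF; exact (Finset.subset_union_left).trans Finset.subset_union_left)
    (Nat.le_add_left _ _)

lemma subset_clF (d : PySem.Dict String (List (List String))) (S : Finset String) :
    S ⊆ clF d S := subset_iterate d _ S

lemma childs_subset_clF (d : PySem.Dict String (List (List String))) (S : Finset String)
    {k : String} (hk : k ∈ clF d S) : (childsOf d k).toFinset ⊆ clF d S := by
  intro c hc
  rw [List.mem_toFinset] at hc
  have := mem_stepF_of_child (d := d) hk hc
  rwa [clF_fixed] at this

lemma clF_minimal (d : PySem.Dict String (List (List String))) {S T : Finset String}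
    (hST : S ⊆ T) (hT : ∀ k ∈ T, (childsOf d k).toFinset ⊆ T) : clF d S ⊆ T :=
  iterate_subset_of_closed d (stepF_subset_of_closed d hT) _ S hST

lemma clF_mono (d : PySem.Dict String (List (List String))) {S T : Finset String}
    (h : S ⊆ T) : clF d S ⊆ clF d T :=
  clF_minimal d (h.trans (subset_clF d T)) (fun _ hk => childs_subset_clF d T hk)

lemma clF_empty (d : PySem.Dict String (List (List String))) : clF d ∅ = ∅ :=
  Finset.subset_empty.1 (clF_minimal d subset_rfl (by simp))

lemma clF_union (d : PySem.Dict String (List (List String))) (S T : Finset String) :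
    clF d (S ∪ T) = clF d S ∪ clF d T := by
  apply le_antisymm
  · refine clF_minimal d (Finset.union_subset_union (subset_clF d S) (subset_clF d T)) ?_
    intro k hk
    rcases Finset.mem_union.1 hk with h | h
    · exact (childs_subset_clF d S h).trans Finset.subset_union_left
    · exact (childs_subset_clF d T h).trans Finset.subset_union_right
  · exact Finset.union_subset (clF_mono d Finset.subset_union_left)
      (clF_mono d Finset.subset_union_right)

lemma childsOf_zero (d : PySem.Dict String (List (List String))) : childsOf d "0" = [] := by
  unfold childsOf; simp

lemma clF_singleton (d : PySem.Dict String (List (List String))) (id : String) :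
    clF d {id} = insert id (clF d (childsOf d id).toFinset) := by
  apply le_antisymm
  · refine clF_minimal d (by simp) ?_
    intro k hk
    rcases Finset.mem_insert.1 hk with rfl | h
    · exact ((subset_clF d _).trans (Finset.subset_insert _ _))
    · exact (childs_subset_clF d _ h).trans (Finset.subset_insert _ _)
  · refine Finset.insert_subset ((subset_clF d _) (Finset.mem_singleton_self id)) ?_
    refine clF_minimal d ?_ (fun _ hk => childs_subset_clF d _ hk)
    exact childs_subset_clF d _ ((subset_clF d _) (Finset.mem_singleton_self id))

lemma clF_singleton_subset (d : PySem.Dict String (List (List String))) {S : Finset String}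
    {c : String} (h : c ∈ clF d S) : clF d {c} ⊆ clF d S :=
  clF_minimal d (by simpa) (fun _ hk => childs_subset_clF d S hk)

-- ---- clearing a set of nodes, as one map over the entries ----
def clearVal (v : List (List String)) : List (List String) := PySem.List.pySetD v 0 []

def entryClear (S : Finset String) (p : String × List (List String)) :
    String × List (List String) :=
  (p.1, if p.1 ∈ S ∧ p.1 ≠ "0" then clearVal p.2 else p.2)

def clearD (d : PySem.Dict String (List (List String))) (S : Finset String) :
    PySem.Dict String (List (List String)) :=
  PySem.Dict.mk (d.items.map (entryClear S))

lemma clearVal_cons (c : List String) (rest : List (List String)) :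
    clearVal (c :: rest) = [] :: rest := by
  simp [clearVal, PySem.List.pySetD, PySem.List.pySet?, PySem.List.pyIdx?]

lemma get?_mk_map (l : List (String × List (List String))) (S : Finset String) (k : String) :
    (PySem.Dict.mk (l.map (entryClear S))).get? k
      = ((PySem.Dict.mk l).get? k).map (fun v => if k ∈ S ∧ k ≠ "0" then clearVal v else v) := by
  induction l with
  | nil => rfl
  | cons p l ih =>
    rw [List.map_cons]
    rw [show entryClear S p = ((p.1, if p.1 ∈ S ∧ p.1 ≠ "0" then clearVal p.2 else p.2)) from rfl]
    rw [PySem.Dict.get?_mk_cons, PySem.Dict.get?_mk_cons]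
    by_cases h : p.1 = k
    · subst h; simp
    · have hb : (p.1 == k) = false := by simpa using h
      rw [hb]
      simpa using ih

lemma clearD_get? (d : PySem.Dict String (List (List String))) (S : Finset String) (k : String) :
    (clearD d S).get? k
      = (d.get? k).map (fun v => if k ∈ S ∧ k ≠ "0" then clearVal v else v) := by
  have := get?_mk_map d.items S k
  simpa [clearD] using this

lemma clearD_empty (d : PySem.Dict String (List (List String))) : clearD d ∅ = d := by
  apply PySem.Dict.ext
  show d.items.map (entryClear ∅) = d.items
  have : ∀ p ∈ d.items, entryClear ∅ p = p := by
    intro p _; simp [entryClear]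
  simp [List.map_congr_left this]

lemma clearD_congr (d : PySem.Dict String (List (List String))) {S T : Finset String}
    (h : ∀ k, k ≠ "0" → (k ∈ S ↔ k ∈ T)) : clearD d S = clearD d T := by
  apply PySem.Dict.ext
  show (d.items.map (entryClear S)) = (d.items.map (entryClear T))
  apply List.map_congr_left
  intro p _
  unfold entryClear
  by_cases h0 : p.1 = "0"
  · simp [h0]
  · simp only [h p.1 h0]

lemma clearD_insert (d : PySem.Dict String (List (List String))) (hnd : d.keys.Nodup)
    {S : Finset String} {id : String} {v : List (List String)}
    (hv : d.get? id = some v) (hid0 : id ≠ "0") (_hidS : id ∉ S) :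
    (clearD d S).insert id (clearVal v) = clearD d (insert id S) := by
  have hcont : (clearD d S).contains id = true := by
    rw [PySem.Dict.contains_eq_isSome_get?, clearD_get? d S id, hv]
    rfl
  apply PySem.Dict.ext
  rw [PySem.Dict.items_insert_of_contains _ (clearVal v) hcont]
  show (d.items.map (entryClear S)).map (fun p => if p.1 == id then (id, clearVal v) else p)
      = d.items.map (entryClear (insert id S))
  rw [List.map_map]
  apply List.map_congr_left
  intro p hp
  by_cases h : p.1 = id
  · have hv2 : p.2 = v := by
      have : d.get? p.1 = some p.2 := PySem.Dict.get?_of_mem_items d hp hnd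
      rw [h, hv] at this
      exact (Option.some_injective _ this).symm
    simp only [Function.comp_apply, entryClear, h, beq_self_eq_true, if_true, hv2]
    simp [hid0]
  · have hb : (p.1 == id) = false := by simpa using h
    have hmem : (p.1 ∈ insert id S) ↔ (p.1 ∈ S) := by
      rw [Finset.mem_insert]
      exact or_iff_right h
    simp only [Function.comp_apply, entryClear, hb, hmem]
    simp

lemma clearD_insert_of_fixed (d : PySem.Dict String (List (List String))) (hnd : d.keys.Nodup)
    {S : Finset String} {id : String} {v : List (List String)}
    (hv : d.get? id = some v) (hcv : clearVal v = v) :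
    clearD d (insert id S) = clearD d S := by
  apply PySem.Dict.ext
  show d.items.map (entryClear (insert id S)) = d.items.map (entryClear S)
  apply List.map_congr_left
  intro p hp
  unfold entryClear
  by_cases h : p.1 = id
  · have hv2 : p.2 = v := by
      have : d.get? p.1 = some p.2 := PySem.Dict.get?_of_mem_items d hp hnd
      rw [h, hv] at this
      exact (Option.some_injective _ this).symm
    subst hv2
    by_cases h0 : p.1 = "0" <;> simp [h0, hcv]
  · have : (p.1 ∈ insert id S) ↔ (p.1 ∈ S) := by
      rw [Finset.mem_insert]; exact or_iff_right h
    simp only [this]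

-- ---- characterisation of port A ----
def GoodD (d : PySem.Dict String (List (List String))) (id : String) : Prop :=
  ∀ k ∈ clF d {id}, k ≠ "0" →
    (d.get? k).getD [] ≠ [] ∧ k ∉ clF d (childsOf d k).toFinset

def ClosedD (d : PySem.Dict String (List (List String))) (C : Finset String) : Prop :=
  ∀ k ∈ C, (childsOf d k).toFinset ⊆ C

lemma GoodD_sub {d : PySem.Dict String (List (List String))} {id c : String}
    (hG : GoodD d id) (hc : c ∈ clF d {id}) : GoodD d c := by
  intro k hk hk0
  exact hG k (clF_singleton_subset d hc hk) hk0

lemma dcA_succ (f : Nat) (d : PySem.Dict String (List (List String))) (id : String) :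
    dcA (f + 1) d id =
      if id = "0" then d
      else
        match d.get? id with
        | none => d
        | some v =>
          match PySem.List.pyGet? v 0 with
          | none => d
          | some c =>
            if c = [] then d
            else
              let d' := c.foldl (fun a child => dcA f a child) d
              d'.insert id (PySem.List.pySetD (d'.getD id []) 0 []) := rfl

lemma good_get? {d : PySem.Dict String (List (List String))} {id : String}
    (hG : GoodD d id) (h0 : id ≠ "0") :
    ∃ c rest, d.get? id = some (c :: rest) := by
  have h := (hG id ((subset_clF d _) (Finset.mem_singleton_self id)) h0).1
  rcases hget : d.get? id with _ | v
  · rw [hget] at h; simp at h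
  · rcases v with _ | ⟨c, rest⟩
    · rw [hget] at h; simp at h
    · exact ⟨c, rest, rfl⟩

lemma childsOf_eq {d : PySem.Dict String (List (List String))} {id : String}
    {c : List String} {rest : List (List String)}
    (h0 : id ≠ "0") (hget : d.get? id = some (c :: rest)) : childsOf d id = c := by
  unfold childsOf
  rw [if_neg h0, hget]

lemma fold_dcA (d : PySem.Dict String (List (List String))) (f : Nat)
    (ih : ∀ (id : String) (C : Finset String), GoodD d id → ClosedD d C →
      (clF d {id}).card < f → dcA f (clearD d C) id = clearD d (C ∪ clF d {id})) :
    ∀ (c : List String) (C : Finset String), ClosedD d C →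
      (∀ ch ∈ c, GoodD d ch) → (∀ ch ∈ c, (clF d {ch}).card < f) →
      c.foldl (fun a child => dcA f a child) (clearD d C) = clearD d (C ∪ clF d c.toFinset) := by
  intro c
  induction c with
  | nil => intro C _ _ _; simp [clF_empty]
  | cons ch cs ihc =>
    intro C hC hGs hfs
    rw [List.foldl_cons]
    rw [ih ch C (hGs ch (by simp)) hC (hfs ch (by simp))]
    have hC' : ClosedD d (C ∪ clF d {ch}) := by
      intro k hk
      rcases Finset.mem_union.1 hk with h | h
      · exact (hC k h).trans Finset.subset_union_left
      · exact (childs_subset_clF d _ h).trans Finset.subset_union_right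
    rw [ihc (C ∪ clF d {ch}) hC' (fun x hx => hGs x (by simp [hx])) (fun x hx => hfs x (by simp [hx]))]
    rw [List.toFinset_cons, Finset.insert_eq, clF_union, Finset.union_assoc]

lemma dcA_clear (d : PySem.Dict String (List (List String))) (hnd : d.keys.Nodup) :
    ∀ (f : Nat) (id : String) (C : Finset String),
      GoodD d id → ClosedD d C → (clF d {id}).card < f →
      dcA f (clearD d C) id = clearD d (C ∪ clF d {id}) := by
  intro f
  induction f with
  | zero => intro id C _ _ hf; omega
  | succ f ih =>
    intro id C hG hC hf
    rw [dcA_succ]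
    by_cases h0 : id = "0"
    · subst h0
      rw [if_pos rfl]
      have hcl : clF d {"0"} = {"0"} := by
        rw [clF_singleton, childsOf_zero]
        simp [clF_empty]
      rw [hcl]
      refine clearD_congr d ?_
      intro k hk
      simp [hk]
    · rw [if_neg h0]
      obtain ⟨c, rest, hget⟩ := good_get? hG h0
      have hidcl : id ∈ clF d {id} := (subset_clF d _) (Finset.mem_singleton_self id)
      have hchilds : childsOf d id = c := childsOf_eq h0 hget
      by_cases hmem : id ∈ C
      · -- already cleared: the stored children list is [], A passes
        have hgetc : (clearD d C).get? id = some ([] :: rest) := by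
          rw [clearD_get?, hget]
          simp [hmem, h0, clearVal_cons]
        rw [hgetc]
        dsimp only
        rw [PySem.List.pyGet?_zero_cons]
        dsimp only
        rw [if_pos rfl]
        have hsub : clF d {id} ⊆ C :=
          clF_minimal d (by simpa using hmem) hC
        refine clearD_congr d ?_
        intro k hk
        constructor
        · intro h; exact Finset.mem_union_left _ h
        · intro h; rcases Finset.mem_union.1 h with h | h
          · exact h
          · exact hsub h
      · -- not yet cleared
        have hgetc : (clearD d C).get? id = some (c :: rest) := by
          rw [clearD_get?, hget]
          simp [hmem]
        rw [hgetc]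
        dsimp only
        rw [PySem.List.pyGet?_zero_cons]
        dsimp only
        have hacyc : id ∉ clF d (childsOf d id).toFinset := (hG id hidcl h0).2
        by_cases hcnil : c = []
        · rw [if_pos hcnil]
          subst hcnil
          have hcl : clF d {id} = {id} := by
            rw [clF_singleton, hchilds]
            simp [clF_empty]
          rw [hcl]
          have : C ∪ {id} = insert id C := by
            rw [Finset.union_comm, Finset.insert_eq]
          rw [this, clearD_insert_of_fixed d hnd hget (by rw [clearVal_cons])]
        · rw [if_neg hcnil]
          have hcsub : c.toFinset ⊆ clF d {id} := by
            rw [← hchilds]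
            exact childs_subset_clF d _ hidcl
          have hclsub : clF d c.toFinset ⊆ clF d {id} :=
            clF_minimal d hcsub (fun _ hk => childs_subset_clF d _ hk)
          have hidnotin : id ∉ clF d c.toFinset := by rw [← hchilds] at *; exact hacyc
          -- the fold over the children
          have hfold : c.foldl (fun a child => dcA f a child) (clearD d C)
              = clearD d (C ∪ clF d c.toFinset) := by
            have hcard : ∀ ch ∈ c, (clF d {ch}).card < f := by
              intro ch hch
              have h1 : clF d {ch} ⊆ clF d c.toFinset :=
                clF_mono d (by simpa using List.mem_toFinset.2 hch)
              have h2 : clF d {ch} ⊂ clF d {id} := by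
                rw [Finset.ssubset_def]
                exact ⟨h1.trans hclsub, fun hback => hidnotin (h1 (hback hidcl))⟩
              have := Finset.card_lt_card h2
              omega
            have hGs : ∀ ch ∈ c, GoodD d ch := fun ch hch =>
              GoodD_sub hG (hcsub (List.mem_toFinset.2 hch))
            exact fold_dcA d f ih c C hC hGs hcard
          rw [hfold]
          have hid2 : id ∉ C ∪ clF d c.toFinset := by
            simp only [Finset.mem_union, not_or]
            exact ⟨hmem, hidnotin⟩
          have hgd : (clearD d (C ∪ clF d c.toFinset)).getD id [] = c :: rest := by
            rw [PySem.Dict.getD_eq_get?_getD, clearD_get?, hget]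
            simp [hid2]
          rw [hgd]
          rw [show PySem.List.pySetD (c :: rest) 0 [] = clearVal (c :: rest) from rfl]
          rw [clearD_insert d hnd hget h0 hid2]
          rw [clF_singleton d id, hchilds, Finset.union_insert]

-- ---- characterisation of port B ----
lemma bChild_eq (d : PySem.Dict String (List (List String))) (node : String)
    (h0 : node ≠ "0") :
    PySem.List.pyGetD (d.getD node []) 0 [] = childsOf d node := by
  unfold childsOf
  rw [if_neg h0]
  rcases hget : d.get? node with _ | v
  · rw [PySem.Dict.getD_eq_get?_getD, hget]
    rfl
  · rw [PySem.Dict.getD_eq_get?_getD, hget]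
    rcases v with _ | ⟨c, rest⟩
    · rfl
    · exact PySem.List.pyGetD_zero_cons _ _ _

lemma bDiscover_succ (f : Nat) (d : PySem.Dict String (List (List String)))
    (order : List String) (seen : PySem.Set String) (i : Nat) :
    bDiscover (f + 1) d order seen i =
      if i < order.length then
        if order.getD i "" = "0" then bDiscover f d order seen (i + 1)
        else
          bDiscover f d
            ((PySem.List.pyGetD (d.getD (order.getD i "") []) 0 []).foldl
              (fun (p : List String × PySem.Set String) child =>
                if child ∈ p.2 then p else (p.1 ++ [child], PySem.Set.add p.2 child))
              (order, seen)).1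
            ((PySem.List.pyGetD (d.getD (order.getD i "") []) 0 []).foldl
              (fun (p : List String × PySem.Set String) child =>
                if child ∈ p.2 then p else (p.1 ++ [child], PySem.Set.add p.2 child))
              (order, seen)).2
            (i + 1)
      else order := rfl

lemma bFold (c : List String) :
    ∀ (order : List String), order.Nodup →
      (let r := c.foldl
        (fun (p : List String × PySem.Set String) child =>
          if child ∈ p.2 then p else (p.1 ++ [child], PySem.Set.add p.2 child))
        (order, order)
       r.2 = r.1 ∧ r.1.Nodup ∧ order <+: r.1 ∧ (∀ x, x ∈ r.1 ↔ x ∈ order ∨ x ∈ c)) := by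
  induction c with
  | nil =>
    intro order hnd
    exact ⟨rfl, hnd, List.prefix_refl _, by simp⟩
  | cons ch cs ihc =>
    intro order hnd
    rw [List.foldl_cons]
    by_cases h : ch ∈ order
    · rw [if_pos (by simpa using h)]
      obtain ⟨h1, h2, h3, h4⟩ := ihc order hnd
      refine ⟨h1, h2, h3, ?_⟩
      intro x
      rw [h4 x]
      constructor
      · rintro (hx | hx)
        · exact Or.inl hx
        · exact Or.inr (List.mem_cons_of_mem _ hx)
      · rintro (hx | hx)
        · exact Or.inl hx
        · rcases List.mem_cons.1 hx with rfl | hx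
          · exact Or.inl h
          · exact Or.inr hx
    · rw [if_neg (by simpa using h)]
      have hadd : PySem.Set.add order ch = order ++ [ch] := PySem.Set.add_of_not_mem h
      rw [hadd]
      have hnd' : (order ++ [ch]).Nodup := by
        rw [List.nodup_append]
        refine ⟨hnd, List.nodup_singleton _, ?_⟩
        intro a ha b hb
        rw [List.mem_singleton] at hb
        subst hb
        exact fun he => h (he ▸ ha)
      obtain ⟨h1, h2, h3, h4⟩ := ihc (order ++ [ch]) hnd'
      refine ⟨h1, h2, (List.prefix_append _ _).trans h3, ?_⟩
      intro x
      rw [h4 x]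
      simp only [List.mem_append, List.mem_cons]
      tauto

lemma bDiscover_spec (d : PySem.Dict String (List (List String))) (id0 : String) :
    ∀ (f : Nat) (i : Nat) (order : List String),
      order.Nodup → id0 ∈ order → i ≤ order.length →
      order.toFinset ⊆ clF d {id0} →
      (∀ j, j < i → (childsOf d (order.getD j "")).toFinset ⊆ order.toFinset) →
      (clF d {id0}).card ≤ i + f →
      ((bDiscover f d order order i).Nodup ∧
        (bDiscover f d order order i).toFinset = clF d {id0}) := by
  intro f
  induction f with
  | zero =>
    intro i order hnd hid hi hsub _hproc hcard
    show order.Nodup ∧ order.toFinset = clF d {id0}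
    refine ⟨hnd, ?_⟩
    have hlen : order.toFinset.card = order.length := List.toFinset_card_of_nodup hnd
    have : (clF d {id0}).card ≤ order.toFinset.card := by omega
    exact Finset.eq_of_subset_of_card_le hsub this |>.symm ▸ rfl
  | succ f ihf =>
    intro i order hnd hid hi hsub hproc hcard
    rw [bDiscover_succ]
    by_cases h : i < order.length
    · rw [if_pos h]
      set node := order.getD i "" with hnode
      have hnodemem : node ∈ order := by
        rw [hnode, List.getD_eq_getElem order "" h]
        exact List.getElem_mem h
      by_cases h0 : node = "0"
      · rw [if_pos h0]
        refine ihf (i + 1) order hnd hid (by omega) hsub ?_ (by omega)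
        intro j hj
        rcases Nat.lt_succ_iff_lt_or_eq.1 hj with hj | rfl
        · exact hproc j hj
        · rw [← hnode, h0, childsOf_zero]
          simp
      · rw [if_neg h0]
        rw [bChild_eq d node h0]
        set st := (childsOf d node).foldl
          (fun (p : List String × PySem.Set String) child =>
            if child ∈ p.2 then p else (p.1 ++ [child], PySem.Set.add p.2 child))
          (order, order) with hst
        obtain ⟨h1, h2, h3, h4⟩ := bFold (childsOf d node) order hnd
        rw [← hst] at h1 h2 h3 h4
        rw [h1]
        obtain ⟨tail, htail⟩ := h3
        refine ihf (i + 1) st.1 h2 (htail ▸ List.mem_append_left _ hid) ?_ ?_ ?_ ?_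
        · have : order.length ≤ st.1.length := htail ▸ by simp
          omega
        · intro x hx
          rw [List.mem_toFinset] at hx
          rcases (h4 x).1 hx with hx | hx
          · exact hsub (List.mem_toFinset.2 hx)
          · exact childs_subset_clF d _ (hsub (List.mem_toFinset.2 hnodemem)) (List.mem_toFinset.2 hx)
        · intro j hj
          rcases Nat.lt_succ_iff_lt_or_eq.1 hj with hj | hje
          · have hjlen : j < order.length := by omega
            have hgd : st.1.getD j "" = order.getD j "" := by
              rw [← htail]
              rw [List.getD_eq_getElem order "" hjlen]
              rw [List.getD_eq_getElem _ "" (by simp; omega)]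
              exact List.getElem_append_left hjlen
            rw [hgd]
            refine (hproc j hj).trans ?_
            intro x hx
            rw [List.mem_toFinset] at hx ⊢
            exact (h4 x).2 (Or.inl hx)
          · subst hje
            have hgd : st.1.getD j "" = node := by
              rw [← htail, hnode]
              rw [List.getD_eq_getElem order "" h]
              rw [List.getD_eq_getElem _ "" (by simp; omega)]
              exact List.getElem_append_left h
            rw [hgd]
            intro x hx
            rw [List.mem_toFinset] at hx ⊢
            exact (h4 x).2 (Or.inr hx)
        · omega
    · rw [if_neg h]
      refine ⟨hnd, ?_⟩
      apply le_antisymm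
      · exact hsub
      · refine clF_minimal d (by simpa using hid) ?_
        intro k hk
        rw [List.mem_toFinset] at hk
        obtain ⟨j, hj, rfl⟩ := List.getElem_of_mem hk
        have : order.getD j "" = order[j] := List.getD_eq_getElem order "" hj
        exact this ▸ hproc j (by omega)

lemma bClear (d : PySem.Dict String (List (List String))) (hnd : d.keys.Nodup) :
    ∀ (l : List String) (S : Finset String), l.Nodup →
      (∀ x ∈ l, x ≠ "0" → x ∉ S ∧ ∃ v, d.get? x = some v) →
      l.foldl (fun a node =>
          if node = "0" then a
          else a.insert node (PySem.List.pySetD (a.getD node []) 0 [])) (clearD d S)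
        = clearD d (S ∪ l.toFinset) := by
  intro l
  induction l with
  | nil => intro S _ _; simp
  | cons x l ihl =>
    intro S hnodup hh
    rw [List.foldl_cons]
    by_cases h0 : x = "0"
    · rw [if_pos h0]
      rw [ihl S hnodup.of_cons (fun y hy => hh y (List.mem_cons_of_mem _ hy))]
      refine clearD_congr d ?_
      intro k hk
      subst h0
      simp only [Finset.mem_union, List.toFinset_cons, Finset.mem_insert, List.mem_toFinset]
      constructor
      · rintro (h | h)
        · exact Or.inl h
        · exact Or.inr (Or.inr h)
      · rintro (h | h | h)
        · exact Or.inl h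
        · exact absurd h hk
        · exact Or.inr h
    · rw [if_neg h0]
      obtain ⟨hxS, v, hv⟩ := hh x (List.mem_cons_self) h0
      have hget : (clearD d S).get? x = some v := by
        rw [clearD_get?, hv]
        simp [hxS]
      have hgd : (clearD d S).getD x [] = v := by
        rw [PySem.Dict.getD_eq_get?_getD, hget]
        rfl
      rw [hgd]
      rw [show PySem.List.pySetD v 0 [] = clearVal v from rfl]
      rw [clearD_insert d hnd hv h0 hxS]
      rw [ihl (insert x S) hnodup.of_cons ?_]
      · rw [List.toFinset_cons, Finset.union_insert, Finset.insert_union]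
      · intro y hy hy0
        obtain ⟨hyS, hvy⟩ := hh y (List.mem_cons_of_mem _ hy) hy0
        refine ⟨?_, hvy⟩
        simp only [Finset.mem_insert, not_or]
        exact ⟨fun he => (List.nodup_cons.1 hnodup).1 (he ▸ hy), hyS⟩

lemma card_clF_le (adj : List (String × List (List String))) (id : String)
    (hG : GoodD (PySem.Dict.mk adj) id) :
    (clF (PySem.Dict.mk adj) {id}).card ≤ adj.length + 1 := by
  set d := PySem.Dict.mk adj with hd
  have hsub : clF d {id} ⊆ insert "0" d.keys.toFinset := by
    intro k hk
    by_cases h0 : k = "0"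
    · simp [h0]
    · have h1 := (hG k hk h0).1
      rcases hget : d.get? k with _ | v
      · rw [hget] at h1; simp at h1
      · have : k ∈ d.keys := by
          by_contra hcon
          rw [(PySem.Dict.get?_eq_none_iff_not_mem_keys d k).2 hcon] at hget
          cases hget
        simp [List.mem_toFinset, this]
  calc (clF d {id}).card ≤ (insert "0" d.keys.toFinset).card := Finset.card_le_card hsub
    _ ≤ d.keys.toFinset.card + 1 := Finset.card_insert_le _ _
    _ ≤ d.keys.length + 1 := by
        have := d.keys.toFinset_card_le
        omega
    _ = adj.length + 1 := by
        have : d.keys.length = adj.length := by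
          rw [hd]
          simp [PySem.Dict.keys]
        omega

lemma keys_mk_nodup (adj : List (String × List (List String)))
    (hnd : (adj.map Prod.fst).Nodup) : (PySem.Dict.mk adj).keys.Nodup := by
  simpa [PySem.Dict.keys] using hnd

-- ===== VERDICT (by name: the statement is the Claim_ definition above) =====
theorem delete_children_spec : Claim_equal_delete_children := by
  intro adj id _hdom hPre
  unfold Spec_delete_children
  obtain ⟨hnd0, hPre2⟩ := hPre
  have hnd : (PySem.Dict.mk adj).keys.Nodup := keys_mk_nodup adj hnd0
  have hG : GoodD (PySem.Dict.mk adj) id := hPre2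
  by_cases h0 : id = "0"
  · subst h0
    unfold delete_children delete_children_alt
    rw [if_pos rfl]
    rw [show adj.length + 2 = adj.length + 1 + 1 from rfl, dcA_succ, if_pos rfl]
  · simp only [delete_children, delete_children_alt, if_neg h0]
    have hcard := card_clF_le adj id hG
    have hA : dcA (adj.length + 2) (clearD (PySem.Dict.mk adj) ∅) id
        = clearD (PySem.Dict.mk adj) (∅ ∪ clF (PySem.Dict.mk adj) {id}) :=
      dcA_clear (PySem.Dict.mk adj) hnd (adj.length + 2) id ∅ hG
        (by intro k hk; simp at hk) (by omega)
    rw [clearD_empty] at hA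
    rw [hA]
    have hofl : PySem.Set.ofList [id] = [id] := rfl
    rw [hofl]
    obtain ⟨hordnd, hordset⟩ := bDiscover_spec (PySem.Dict.mk adj) id (adj.length + 2) 0 [id]
      (List.nodup_singleton _) (List.mem_singleton_self _) (by simp)
      (by simpa using subset_clF (PySem.Dict.mk adj) {id})
      (by intro j hj; omega) (by omega)
    have hB := bClear (PySem.Dict.mk adj) hnd
      (bDiscover (adj.length + 2) (PySem.Dict.mk adj) [id] [id] 0) ∅ hordnd ?_
    · rw [clearD_empty] at hB
      rw [hB, hordset]
    · intro x hx hx0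
      refine ⟨Finset.notMem_empty x, ?_⟩
      have hxcl : x ∈ clF (PySem.Dict.mk adj) {id} := hordset ▸ List.mem_toFinset.2 hx
      have h1 := (hG x hxcl hx0).1
      rcases hget : (PySem.Dict.mk adj).get? x with _ | v
      · rw [hget] at h1; simp at h1
      · exact ⟨v, rfl⟩
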